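-- pv_equiv track=rewrite | github.com/Grotri/QWalityML | dataset_builder/main.py | get_configurations
-- ===== SOURCE A (Python) =====
-- def get_configurations(total=60):
--     configs = []
--     for i in range(1, total + 1):
--         if total % i == 0:
--             j = total // i
--             if 3 <= i <= 15 and 3 <= j <= 15 and i <= j + 1:
--                 configs.append((i, j))
--     return configs
-- ===== SOURCE B (Python) =====
-- def get_configurations(total=60):
--     configs = []
--     for i in range(3, 16):
--         for j in range(3, 16):
--             if i * j == total and i <= j + 1:
--                 configs.append((i, j))
--     return configs
-- ===== Notes on version B (the rewrite author's own statement) =====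
-- stated objective: faster
-- what changed: Replaces the divisor scan over range(1, total+1) (trial division with total % i and total // i) by a bounded double loop over candidate factor pairs 3..15 x 3..15 testing i*j == total, so runtime no longer depends on total.
import Mathlib
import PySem

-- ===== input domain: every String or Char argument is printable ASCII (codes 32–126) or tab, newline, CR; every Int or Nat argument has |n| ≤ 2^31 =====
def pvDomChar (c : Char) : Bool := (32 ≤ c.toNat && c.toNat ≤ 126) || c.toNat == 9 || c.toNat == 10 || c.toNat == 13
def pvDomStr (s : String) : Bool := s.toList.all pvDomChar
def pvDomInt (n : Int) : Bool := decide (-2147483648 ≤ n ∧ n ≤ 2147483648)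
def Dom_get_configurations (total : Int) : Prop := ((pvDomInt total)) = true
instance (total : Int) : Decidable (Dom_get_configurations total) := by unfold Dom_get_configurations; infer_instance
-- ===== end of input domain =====

-- B replaces A's divisor scan over range(1, total+1) by a bounded double loop over
-- candidate factor pairs 3..15 × 3..15 testing i*j == total, making the runtime independent of total (objective: faster).

-- ===== PORT A =====
def get_configurations (total : Int) : List (List Int) :=
  (PySem.List.pyRange 1 (total + 1) 1).foldl (fun configs i =>
    if PySem.Int.mod total i = 0 then
      let j := PySem.Int.floordiv total i
      if 3 ≤ i ∧ i ≤ 15 ∧ 3 ≤ j ∧ j ≤ 15 ∧ i ≤ j + 1 then configs ++ [[i, j]] else configs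
    else configs) []

-- ===== PORT B =====
def get_configurations_alt (total : Int) : List (List Int) :=
  (PySem.List.pyRange 3 16 1).foldl (fun configs i =>
    (PySem.List.pyRange 3 16 1).foldl (fun configs j =>
      if i * j = total ∧ i ≤ j + 1 then configs ++ [[i, j]] else configs) configs) []

-- ===== PRECONDITION & SPEC =====
def Spec_get_configurations (total : Int) (out : List (List Int)) : Prop := out = get_configurations_alt total
instance (total : Int) (out : List (List Int)) : Decidable (Spec_get_configurations total out) := by unfold Spec_get_configurations; infer_instance

-- ===== CLAIM (what is proved, stated in full; the proofs are below) =====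
def Claim_equal_get_configurations : Prop := ∀ (total : Int), Dom_get_configurations total → Spec_get_configurations total (get_configurations total)

-- ===== LEMMAS AND PROOFS =====

-- Any appended pair (i, j) satisfies total = j * i with 3 ≤ i, j ≤ 15, hence 9 ≤ total ≤ 225;
-- outside that band A's loop appends nothing.
theorem pv_A_empty (total : Int) (h : total < 9 ∨ 225 < total) : get_configurations total = [] := by
  unfold get_configurations
  rw [PySem.List.foldl_congr_mem (g := fun acc _ => acc), PySem.List.foldl_ignore]
  intro acc i _
  by_cases h1 : PySem.Int.mod total i = 0
  · simp only [if_pos h1]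
    by_cases h2 : 3 ≤ i ∧ i ≤ 15 ∧ 3 ≤ PySem.Int.floordiv total i ∧
        PySem.Int.floordiv total i ≤ 15 ∧ i ≤ PySem.Int.floordiv total i + 1
    · exfalso
      have hdm := PySem.Int.floordiv_mul_add_mod total i
      rw [h1, add_zero] at hdm
      obtain ⟨hi1, hi2, h3, h4, _⟩ := h2
      rcases h with h | h <;> nlinarith
    · exact if_neg h2
  · exact if_neg h1

-- Outside the same band i * j = total is impossible for 3 ≤ i, j ≤ 15, so B appends nothing.
theorem pv_B_empty (total : Int) (h : total < 9 ∨ 225 < total) : get_configurations_alt total = [] := by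
  unfold get_configurations_alt
  rw [PySem.List.foldl_congr_mem (g := fun acc _ => acc), PySem.List.foldl_ignore]
  intro acc i hi
  rw [PySem.List.foldl_congr_mem (g := fun acc _ => acc), PySem.List.foldl_ignore]
  intro acc' j hj
  rw [PySem.List.mem_pyRange_one] at hi hj
  split_ifs with hc
  · exfalso; obtain ⟨he, _⟩ := hc
    rcases h with h | h <;> nlinarith [hi.1, hi.2, hj.1, hj.2]
  · rfl

set_option maxRecDepth 20000 in
theorem pv_mid : ∀ t ∈ Finset.Icc (9:Int) 225, get_configurations t = get_configurations_alt t := by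
  decide

-- ===== VERDICT (by name: the statement is the Claim_ definition above) =====
theorem get_configurations_spec : Claim_equal_get_configurations := by
  intro total _
  unfold Spec_get_configurations
  by_cases h : 9 ≤ total ∧ total ≤ 225
  · exact pv_mid total (Finset.mem_Icc.mpr h)
  · rw [pv_A_empty total (by omega), pv_B_empty total (by omega)]
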